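-- pv_equiv track=rewrite | github.com/oceanefrqt/monotonic_ensemble_model | Module/monotonic_regression_uncertainty.py | labels_point
-- ===== SOURCE A (Python) =====
-- def labels_point(X, bpr, rev, up):
--     r_p = list()
--     b_p = list()
--
--     for x in X:
--         x = x[0]
--         if x in bpr:
--             r_p.append(x)
--         else:
--             if not rev and up: #CASE 1
--                 flag = 0
--                 for br in bpr:
--                     if x[0] >= br[0] and x[1] >= br[1]:
--                         flag = 1
--                 if flag == 0:
--                     b_p.append(x)
--                 else:
--                     r_p.append(x)
--
--             if rev and up: #CASE 2
--                 flag = 0 #consider as blue by default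
--                 for br in bpr:
--                     if x[0] <= br[0] and x[1] >= br[1]:
--                         flag = 1
--                 if flag == 0:
--                     b_p.append(x)
--                 else:
--                     r_p.append(x)
--
--             if not rev and not up: #CASE 3
--                 flag = 0 #consider as blue by default
--                 for br in bpr:
--                     if x[0] <= br[0] and x[1] <= br[1]:
--                         flag = 1
--                 if flag == 0:
--                     b_p.append(x)
--                 else:
--                     r_p.append(x)
--
--             if rev and not up: #CASE 4
--                 flag = 0 #consider as blue by default
--                 for br in bpr:
--                     if  x[0] >= br[0] and x[1] <= br[1]:
--                         flag =1
--                 if flag == 0: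
--                     b_p.append(x)
--                 else:
--                     r_p.append(x)
--     return r_p, b_p
-- ===== SOURCE B (Python) =====
-- def labels_point(X, bpr, rev, up):
--     # Normalize all four dominance cases to the same <=,<= query via sign flips,
--     # then answer each point with a binary search over bpr sorted by first coord
--     # with running prefix minima of the second coord.
--     sx = 1 if rev != up else -1
--     sy = 1 if up else -1
--     pts = sorted([(sx * b0, sy * b1) for (b0, b1) in bpr], key=lambda p: p[0])
--     keys = [p[0] for p in pts]
--     pref = []
--     m = None
--     for _, b1 in pts:
--         m = b1 if (m is None or b1 < m) else m
--         pref.append(m)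
--     bset = set(bpr)
--     r_p = []
--     b_p = []
--     for x in X:
--         x = x[0]
--         if x in bset:
--             r_p.append(x)
--             continue
--         tx0 = sx * x[0]
--         tx1 = sy * x[1]
--         lo, hi = 0, len(keys)
--         while lo < hi:
--             mid = (lo + hi) // 2
--             if keys[mid] <= tx0:
--                 lo = mid + 1
--             else:
--                 hi = mid
--         if lo > 0 and pref[lo - 1] <= tx1:
--             r_p.append(x)
--         else:
--             b_p.append(x)
--     return r_p, b_p
-- ===== Notes on version B (the rewrite author's own statement) =====
-- stated objective: faster
-- what changed: Replaces the per-point linear scan of bpr (inside four duplicated case loops) by one normalisation of all four cases via sign flips, a single sort of bpr by first coordinate with prefix minima of the second, and a binary-search dominance query per point.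
import Mathlib
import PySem

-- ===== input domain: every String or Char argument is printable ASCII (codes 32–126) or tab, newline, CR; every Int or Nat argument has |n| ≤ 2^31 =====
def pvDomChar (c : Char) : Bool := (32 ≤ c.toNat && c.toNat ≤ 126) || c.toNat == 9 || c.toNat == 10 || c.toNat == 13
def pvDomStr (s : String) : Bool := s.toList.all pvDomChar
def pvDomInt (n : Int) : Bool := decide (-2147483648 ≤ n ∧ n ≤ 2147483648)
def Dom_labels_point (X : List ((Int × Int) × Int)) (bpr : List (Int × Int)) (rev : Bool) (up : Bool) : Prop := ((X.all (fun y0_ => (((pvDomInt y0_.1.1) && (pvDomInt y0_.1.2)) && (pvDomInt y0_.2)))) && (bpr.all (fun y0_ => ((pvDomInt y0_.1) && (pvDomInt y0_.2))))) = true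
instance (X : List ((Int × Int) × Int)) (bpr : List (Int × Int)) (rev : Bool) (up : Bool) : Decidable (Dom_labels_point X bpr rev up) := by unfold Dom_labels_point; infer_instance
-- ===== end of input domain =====

-- B normalises the four dominance cases by sign flips and answers each point by binary
-- search over bpr sorted by first coordinate with prefix minima of the second (faster).


-- ===== PORT A =====
def labels_point (X : List ((Int × Int) × Int)) (bpr : List (Int × Int)) (rev : Bool) (up : Bool) : (List (Int × Int)) × (List (Int × Int)) :=
  X.foldl (fun acc xe =>
    let x := xe.1
    if bpr.contains x then (acc.1 ++ [x], acc.2)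
    else
      let acc := if !rev && up then
          (let flag := bpr.foldl (fun f br => if x.1 ≥ br.1 && x.2 ≥ br.2 then 1 else f) (0 : Int)
           if flag = 0 then (acc.1, acc.2 ++ [x]) else (acc.1 ++ [x], acc.2))
        else acc
      let acc := if rev && up then
          (let flag := bpr.foldl (fun f br => if x.1 ≤ br.1 && x.2 ≥ br.2 then 1 else f) (0 : Int)
           if flag = 0 then (acc.1, acc.2 ++ [x]) else (acc.1 ++ [x], acc.2))
        else acc
      let acc := if !rev && !up then
          (let flag := bpr.foldl (fun f br => if x.1 ≤ br.1 && x.2 ≤ br.2 then 1 else f) (0 : Int)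
           if flag = 0 then (acc.1, acc.2 ++ [x]) else (acc.1 ++ [x], acc.2))
        else acc
      let acc := if rev && !up then
          (let flag := bpr.foldl (fun f br => if x.1 ≥ br.1 && x.2 ≤ br.2 then 1 else f) (0 : Int)
           if flag = 0 then (acc.1, acc.2 ++ [x]) else (acc.1 ++ [x], acc.2))
        else acc
      acc) ([], [])

-- ===== PORT B =====
-- the 'while lo < hi' binary-search loop of Source B
def bisloop (keys : List Int) (v : Int) (lo hi : Nat) : Nat :=
  if lo < hi then
    let mid := (lo + hi) / 2
    if keys.getD mid 0 ≤ v then bisloop keys v (mid + 1) hi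
    else bisloop keys v lo mid
  else lo
termination_by hi - lo
decreasing_by all_goals omega

-- the prefix-minima loop of Source B (carrying the running minimum m)
def prefMins : List (Int × Int) → Option Int → List Int
  | [], _ => []
  | p :: t, m =>
    let m' := match m with
      | none => p.2
      | some mv => if p.2 < mv then p.2 else mv
    m' :: prefMins t (some m')

def labels_point_alt (X : List ((Int × Int) × Int)) (bpr : List (Int × Int)) (rev : Bool) (up : Bool) : (List (Int × Int)) × (List (Int × Int)) :=
  let sx : Int := if rev != up then 1 else -1
  let sy : Int := if up then 1 else -1
  let pts := PySem.List.sorted (bpr.map (fun b => (sx * b.1, sy * b.2))) (fun p => p.1) false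
  let keys := pts.map (fun p => p.1)
  let pref := prefMins pts none
  let bset := PySem.Set.ofList bpr
  X.foldl (fun acc xe =>
    let x := xe.1
    if PySem.Set.contains bset x then (acc.1 ++ [x], acc.2)
    else
      let tx0 := sx * x.1
      let tx1 := sy * x.2
      let lo := bisloop keys tx0 0 keys.length
      if 0 < lo ∧ pref.getD (lo - 1) 0 ≤ tx1 then (acc.1 ++ [x], acc.2)
      else (acc.1, acc.2 ++ [x])) ([], [])

-- ===== PRECONDITION & SPEC =====
def Spec_labels_point (X : List ((Int × Int) × Int)) (bpr : List (Int × Int)) (rev : Bool) (up : Bool) (out : (List (Int × Int)) × (List (Int × Int))) : Prop := out = labels_point_alt X bpr rev up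
instance (X : List ((Int × Int) × Int)) (bpr : List (Int × Int)) (rev : Bool) (up : Bool) (out : (List (Int × Int)) × (List (Int × Int))) : Decidable (Spec_labels_point X bpr rev up out) := by unfold Spec_labels_point; infer_instance

-- ===== CLAIM (what is proved, stated in full; the proofs are below) =====
def Claim_equal_labels_point : Prop := ∀ (X : List ((Int × Int) × Int)) (bpr : List (Int × Int)) (rev : Bool) (up : Bool), Dom_labels_point X bpr rev up → Spec_labels_point X bpr rev up (labels_point X bpr rev up)

-- ===== LEMMAS AND PROOFS =====

-- A's flag loop: the result is 1 iff some element satisfies the condition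
theorem flag_foldl (bpr : List (Int × Int)) (c : (Int × Int) → Bool) (i : Int) :
    bpr.foldl (fun f br => if c br then 1 else f) i = if bpr.any c then 1 else i := by
  induction bpr generalizing i with
  | nil => simp
  | cons br t ih =>
    simp only [List.foldl_cons, List.any_cons, ih]
    by_cases h : c br <;> by_cases h2 : t.any c <;> simp [h, h2]

-- monotone getD on a nondecreasing list
theorem getD_mono {keys : List Int} (hs : keys.Pairwise (· ≤ ·)) {i j : Nat}
    (hij : i ≤ j) (hj : j < keys.length) : keys.getD i 0 ≤ keys.getD j 0 := by
  rcases eq_or_lt_of_le hij with rfl | hlt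
  · exact le_refl _
  · rw [List.getD_eq_getElem _ _ (lt_of_le_of_lt hij hj), List.getD_eq_getElem _ _ hj]
    exact (List.pairwise_iff_getElem.mp hs) i j (lt_of_le_of_lt hij hj) hj hlt

theorem bisloop_spec (keys : List Int) (v : Int) (hs : keys.Pairwise (· ≤ ·)) :
    ∀ (lo hi : Nat), lo ≤ hi → hi ≤ keys.length →
    (∀ i, i < lo → keys.getD i 0 ≤ v) →
    (∀ i, hi ≤ i → i < keys.length → v < keys.getD i 0) →
    bisloop keys v lo hi ≤ keys.length ∧
    (∀ i, i < bisloop keys v lo hi → keys.getD i 0 ≤ v) ∧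
    (∀ i, bisloop keys v lo hi ≤ i → i < keys.length → v < keys.getD i 0) := by
  intro lo hi
  induction hlh : hi - lo using Nat.strong_induction_on generalizing lo hi with
  | _ n ih =>
    intro hle hhi hbelow habove
    rw [bisloop]
    by_cases h : lo < hi
    · simp only [if_pos h]
      set mid := (lo + hi) / 2 with hmid
      have hm1 : lo ≤ mid := by omega
      have hm2 : mid < hi := by omega
      by_cases hk : keys.getD mid 0 ≤ v
      · simp only [if_pos hk]
        refine ih (hi - (mid + 1)) (by omega) (mid + 1) hi rfl (by omega) hhi ?_ habove
        intro i hi2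
        by_cases hcase : i < lo
        · exact hbelow i hcase
        · exact le_trans (getD_mono hs (by omega) (by omega)) hk
      · simp only [if_neg hk]
        refine ih (mid - lo) (by omega) lo mid rfl (by omega) (by omega) hbelow ?_
        intro i hi2 hi3
        by_cases hcase : hi ≤ i
        · exact habove i hcase hi3
        · exact lt_of_lt_of_le (lt_of_not_ge hk) (getD_mono hs hi2 hi3)
    · simp only [if_neg h]
      have : lo = hi := by omega
      subst this
      exact ⟨hhi, fun i h1 => hbelow i h1, fun i h1 h2 => habove i h1 h2⟩

theorem prefMins_le_iff (t : Int) :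
    ∀ (pts : List (Int × Int)) (m : Option Int) (j : Nat), j < pts.length →
    ((prefMins pts m).getD j 0 ≤ t ↔
      (∃ i, i ≤ j ∧ ∃ h : i < pts.length, pts[i].2 ≤ t) ∨ (∃ mv, m = some mv ∧ mv ≤ t)) := by
  intro pts
  induction pts with
  | nil => intro m j hj; simp at hj
  | cons p tail ih =>
    intro m j hj
    have hm' : ((match m with
        | none => p.2
        | some mv => if p.2 < mv then p.2 else mv) ≤ t) ↔ (p.2 ≤ t ∨ ∃ mv, m = some mv ∧ mv ≤ t) := by
      cases m with
      | none => simp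
      | some mv =>
        simp only [Option.some.injEq]
        constructor
        · intro h
          by_cases hc : p.2 < mv
          · left; simpa [hc] using h
          · right; exact ⟨mv, rfl, by simpa [hc] using h⟩
        · rintro (h | ⟨mv', rfl, h⟩) <;> [skip; skip] <;> split <;> omega
    cases j with
    | zero =>
      simp only [prefMins, List.getD_cons_zero]
      rw [hm']
      constructor
      · rintro (h | h)
        · exact Or.inl ⟨0, le_refl _, by simp, by simpa using h⟩
        · exact Or.inr h
      · rintro (⟨i, hi, hlen, hle⟩ | h)
        · interval_cases i; exact Or.inl (by simpa using hle)
        · exact Or.inr h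
    | succ j' =>
      simp only [prefMins, List.getD_cons_succ]
      rw [ih _ j' (by simpa using hj)]
      constructor
      · rintro (⟨i, hij, hlen, hle⟩ | h)
        · exact Or.inl ⟨i + 1, by omega, by simpa using hlen, by simpa using hle⟩
        · rcases hm'.mp (by rcases h with ⟨mv, hmv, hle⟩; cases hmv; exact hle) with h2 | h2
          · exact Or.inl ⟨0, by omega, by simp, by simpa using h2⟩
          · exact Or.inr h2
      · rintro (⟨i, hij, hlen, hle⟩ | h)
        · cases i with
          | zero => exact Or.inr ⟨_, rfl, hm'.mpr (Or.inl (by simpa using hle))⟩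
          | succ i' => exact Or.inl ⟨i', by omega, by simpa using hlen, by simpa using hle⟩
        · exact Or.inr ⟨_, rfl, hm'.mpr (Or.inr h)⟩

-- B's query (binary search + prefix minimum) answers the dominance existence question
theorem query_iff (pts : List (Int × Int)) (hs : pts.Pairwise (fun a b => a.1 ≤ b.1))
    (tx0 tx1 : Int) :
    (0 < bisloop (pts.map (fun p => p.1)) tx0 0 (pts.map (fun p => p.1)).length ∧
      (prefMins pts none).getD (bisloop (pts.map (fun p => p.1)) tx0 0 (pts.map (fun p => p.1)).length - 1) 0 ≤ tx1)
    ↔ ∃ p ∈ pts, p.1 ≤ tx0 ∧ p.2 ≤ tx1 := by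
  set keys := pts.map (fun p => p.1) with hkeys
  have hks : keys.Pairwise (· ≤ ·) := List.pairwise_map.mpr hs
  obtain ⟨hr1, hr2, hr3⟩ := bisloop_spec keys tx0 hks 0 keys.length (by omega) (le_refl _)
    (by omega) (by omega)
  set r := bisloop keys tx0 0 keys.length with hr
  have hlen : keys.length = pts.length := by simp [hkeys]
  have hkey : ∀ (i : Nat) (h : i < pts.length), keys.getD i 0 = pts[i].1 := by
    intro i h
    rw [List.getD_eq_getElem _ _ (by omega : i < keys.length)]
    simp [hkeys]
  constructor
  · rintro ⟨hpos, hpref⟩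
    rcases (prefMins_le_iff tx1 pts none (r - 1) (by omega)).mp hpref with ⟨i, hir, hilen, hle⟩ | ⟨mv, hmv, _⟩
    · refine ⟨pts[i], List.getElem_mem _, ?_, hle⟩
      have := hr2 i (by omega)
      rwa [hkey i hilen] at this
    · cases hmv
  · rintro ⟨p, hp, hp1, hp2⟩
    obtain ⟨i, hilen, rfl⟩ := List.mem_iff_getElem.mp hp
    have hir : i < r := by
      by_contra hcon
      have := hr3 i (by omega) (by omega)
      rw [hkey i hilen] at this
      omega
    refine ⟨by omega, ?_⟩
    exact (prefMins_le_iff tx1 pts none (r - 1) (by omega)).mpr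
      (Or.inl ⟨i, by omega, hilen, hp2⟩)

-- the dominance existence over B's sorted transformed list equals the one over bpr
theorem exists_sorted_map (bpr : List (Int × Int)) (φ : (Int × Int) → (Int × Int)) (P : (Int × Int) → Prop) :
    (∃ p ∈ PySem.List.sorted (bpr.map φ) (fun p => p.1) false, P p) ↔ ∃ br ∈ bpr, P (φ br) := by
  constructor
  · rintro ⟨p, hp, hP⟩
    rw [PySem.List.mem_sorted _ _ _ _] at hp
    obtain ⟨br, hbr, rfl⟩ := List.mem_map.mp hp
    exact ⟨br, hbr, hP⟩
  · rintro ⟨br, hbr, hP⟩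
    exact ⟨φ br, (PySem.List.mem_sorted _ _ _ _).mpr (List.mem_map.mpr ⟨br, hbr, rfl⟩), hP⟩

-- one normalized dominance branch of A equals B's binary-search query branch
theorem branch_eq (bpr : List (Int × Int)) (x : Int × Int)
    (acc : List (Int × Int) × List (Int × Int)) (sx sy : Int) (c : (Int × Int) → Bool)
    (hc : ∀ br, c br = true ↔ (sx * br.1 ≤ sx * x.1 ∧ sy * br.2 ≤ sy * x.2)) :
    (if (bpr.foldl (fun f br => if c br then 1 else f) (0 : Int)) = 0
      then (acc.1, acc.2 ++ [x]) else (acc.1 ++ [x], acc.2))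
    =
    (if 0 < bisloop ((PySem.List.sorted (bpr.map (fun b => (sx * b.1, sy * b.2))) (fun p => p.1) false).map (fun p => p.1)) (sx * x.1) 0 ((PySem.List.sorted (bpr.map (fun b => (sx * b.1, sy * b.2))) (fun p => p.1) false).map (fun p => p.1)).length ∧ (prefMins (PySem.List.sorted (bpr.map (fun b => (sx * b.1, sy * b.2))) (fun p => p.1) false) none).getD (bisloop ((PySem.List.sorted (bpr.map (fun b => (sx * b.1, sy * b.2))) (fun p => p.1) false).map (fun p => p.1)) (sx * x.1) 0 ((PySem.List.sorted (bpr.map (fun b => (sx * b.1, sy * b.2))) (fun p => p.1) false).map (fun p => p.1)).length - 1) 0 ≤ sy * x.2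
      then (acc.1 ++ [x], acc.2) else (acc.1, acc.2 ++ [x])) := by
  rw [flag_foldl]
  have hq := query_iff (PySem.List.sorted (bpr.map (fun b => (sx * b.1, sy * b.2))) (fun p => p.1) false) (PySem.List.sorted_pairwise _ _) (sx * x.1) (sy * x.2)
  have hex : (∃ p ∈ (PySem.List.sorted (bpr.map (fun b => (sx * b.1, sy * b.2))) (fun p => p.1) false), p.1 ≤ sx * x.1 ∧ p.2 ≤ sy * x.2) ↔ bpr.any c = true := by
    rw [exists_sorted_map]
    simp only [List.any_eq_true, hc]
  by_cases h : bpr.any c = true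
  · rw [if_neg (by simp [h]), if_pos (hq.mpr (hex.mpr h))]
  · rw [if_pos (by simp [h]), if_neg (fun hcond => h (hex.mp (hq.mp hcond)))]

-- containment agrees: x in bpr (list) = x in set(bpr)
theorem contains_ofList (bpr : List (Int × Int)) (x : Int × Int) :
    PySem.Set.contains (PySem.Set.ofList bpr) x = bpr.contains x := by
  simp [PySem.Set.mem_ofList]

-- pointwise equality of the two per-point step functions
theorem step_eq (bpr : List (Int × Int)) (rev up : Bool) (acc : List (Int × Int) × List (Int × Int))
    (xe : (Int × Int) × Int) :
    (let x := xe.1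
     if bpr.contains x then (acc.1 ++ [x], acc.2)
     else
      let acc := if !rev && up then
          (let flag := bpr.foldl (fun f br => if x.1 ≥ br.1 && x.2 ≥ br.2 then 1 else f) (0 : Int)
           if flag = 0 then (acc.1, acc.2 ++ [x]) else (acc.1 ++ [x], acc.2))
        else acc
      let acc := if rev && up then
          (let flag := bpr.foldl (fun f br => if x.1 ≤ br.1 && x.2 ≥ br.2 then 1 else f) (0 : Int)
           if flag = 0 then (acc.1, acc.2 ++ [x]) else (acc.1 ++ [x], acc.2))
        else acc
      let acc := if !rev && !up then
          (let flag := bpr.foldl (fun f br => if x.1 ≤ br.1 && x.2 ≤ br.2 then 1 else f) (0 : Int)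
           if flag = 0 then (acc.1, acc.2 ++ [x]) else (acc.1 ++ [x], acc.2))
        else acc
      let acc := if rev && !up then
          (let flag := bpr.foldl (fun f br => if x.1 ≥ br.1 && x.2 ≤ br.2 then 1 else f) (0 : Int)
           if flag = 0 then (acc.1, acc.2 ++ [x]) else (acc.1 ++ [x], acc.2))
        else acc
      acc)
    =
    (let sx : Int := if rev != up then 1 else -1
     let sy : Int := if up then 1 else -1
     let pts := PySem.List.sorted (bpr.map (fun b => (sx * b.1, sy * b.2))) (fun p => p.1) false
     let keys := pts.map (fun p => p.1)
     let pref := prefMins pts none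
     let bset := PySem.Set.ofList bpr
     let x := xe.1
     if PySem.Set.contains bset x then (acc.1 ++ [x], acc.2)
     else
      let tx0 := sx * x.1
      let tx1 := sy * x.2
      let lo := bisloop keys tx0 0 keys.length
      if 0 < lo ∧ pref.getD (lo - 1) 0 ≤ tx1 then (acc.1 ++ [x], acc.2)
      else (acc.1, acc.2 ++ [x])) := by
  simp only [contains_ofList]
  by_cases hmem : bpr.contains xe.1 = true
  · rw [if_pos hmem, if_pos hmem]
  · rw [if_neg hmem, if_neg hmem]
    cases rev <;> cases up <;>
      simp only [Bool.not_false, Bool.not_true, 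
        Bool.and_self, Bool.and_false, Bool.and_true, bne_self_eq_false,
        Bool.false_bne, Bool.true_bne, reduceIte] <;>
      [ exact branch_eq bpr xe.1 acc (-1) (-1) _ (fun br => by
          simp only [Bool.and_eq_true, decide_eq_true_eq, neg_mul, one_mul]; omega);
        exact branch_eq bpr xe.1 acc 1 1 _ (fun br => by
          simp only [Bool.and_eq_true, decide_eq_true_eq, one_mul, ge_iff_le]);
        exact branch_eq bpr xe.1 acc 1 (-1) _ (fun br => by
          simp only [Bool.and_eq_true, decide_eq_true_eq, neg_mul, one_mul, ge_iff_le]; omega);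
        exact branch_eq bpr xe.1 acc (-1) 1 _ (fun br => by
          simp only [Bool.and_eq_true, decide_eq_true_eq, neg_mul, one_mul, ge_iff_le]; omega)]

-- ===== VERDICT (by name: the statement is the Claim_ definition above) =====
theorem labels_point_spec : Claim_equal_labels_point := by
  intro X bpr rev up _
  unfold Spec_labels_point labels_point labels_point_alt
  exact List.foldl_ext _ _ ([], []) (fun acc xe _ => step_eq bpr rev up acc xe)
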